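-- pv_equiv track=rewrite | github.com/kuznetsovvj/education | algorithms/codeforces/327a.py | check
-- ===== SOURCE A (Python) =====
-- def check(seq):
--     cnt, stack, ones = 0, 0, 0
--     for item in seq:
--         if not stack:
--             if item:
--                 cnt += 1
--             else:
--                 stack += 1
--         else:
--             if item:
--                 ones += 1
--                 stack -= 1
--             else:
--                 stack += 1
--             if stack == 0:
--                 cnt += ones
--                 ones = 0
--     return cnt
-- ===== SOURCE B (Python) =====
-- def check(seq):
--     # Pass 1: clamped running balance; remember the last position where it is 0.
--     bal = 0
--     boundary = 0
--     i = 0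
--     for item in seq:
--         i += 1
--         if item:
--             bal = max(bal - 1, 0)
--         else:
--             bal += 1
--         if bal == 0:
--             boundary = i
--     # Pass 2: count the truthy items before that boundary.
--     return sum(1 for item in seq[:boundary] if item)
-- ===== Notes on version B (the rewrite author's own statement) =====
-- stated objective: alternative
-- what changed: Replaces A's single-pass per-segment flush accumulator (cnt/stack/ones with flush-on-close) by a two-pass computation: first find the last index where the clamped running balance is zero, then count the truthy items before that boundary.
import Mathlib
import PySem

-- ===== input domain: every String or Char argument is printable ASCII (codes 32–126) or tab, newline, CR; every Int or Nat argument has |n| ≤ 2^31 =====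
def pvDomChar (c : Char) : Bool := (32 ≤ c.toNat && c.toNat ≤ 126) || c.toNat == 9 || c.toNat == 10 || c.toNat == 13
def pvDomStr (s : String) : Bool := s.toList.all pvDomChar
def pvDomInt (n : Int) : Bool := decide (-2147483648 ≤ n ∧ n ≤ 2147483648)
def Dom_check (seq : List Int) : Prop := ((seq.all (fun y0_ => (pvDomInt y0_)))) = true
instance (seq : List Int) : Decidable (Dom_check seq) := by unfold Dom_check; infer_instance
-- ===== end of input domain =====

-- B replaces A's per-segment flush accumulator by two passes: find the last zero of the
-- clamped running balance, then count truthy items before that boundary (objective: alternative).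

-- ===== PORT A =====
def stepA (st : Int × Int × Int) (item : Int) : Int × Int × Int :=
  match st with
  | (cnt, stack, ones) =>
    if stack = 0 then
      if item ≠ 0 then (cnt + 1, stack, ones) else (cnt, stack + 1, ones)
    else
      let ones' := if item ≠ 0 then ones + 1 else ones
      let stack' := if item ≠ 0 then stack - 1 else stack + 1
      if stack' = 0 then (cnt + ones', stack', 0) else (cnt, stack', ones')

def check (seq : List Int) : Int := (seq.foldl stepA (0, 0, 0)).1

-- ===== PORT B =====
def stepB (st : Int × Nat × Nat) (item : Int) : Int × Nat × Nat :=
  match st with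
  | (bal, boundary, i) =>
    let i' := i + 1
    let bal' := if item ≠ 0 then max (bal - 1) 0 else bal + 1
    (bal', if bal' = 0 then i' else boundary, i')

-- sum(1 for item in … if item)
def cT (l : List Int) : Int := l.foldl (fun c x => if x ≠ 0 then c + 1 else c) 0

def check_alt (seq : List Int) : Int :=
  cT (seq.take (seq.foldl stepB (0, 0, 0)).2.1)

-- ===== PRECONDITION & SPEC =====
def Spec_check (seq : List Int) (out : Int) : Prop := out = check_alt seq
instance (seq : List Int) (out : Int) : Decidable (Spec_check seq out) := by unfold Spec_check; infer_instance

-- ===== CLAIM (what is proved, stated in full; the proofs are below) =====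
def Claim_equal_check : Prop := ∀ (seq : List Int), Dom_check seq → Spec_check seq (check seq)

-- ===== LEMMAS AND PROOFS =====

theorem cT_shift (l : List Int) (c : Int) :
    l.foldl (fun c x => if x ≠ 0 then c + 1 else c) c = c + cT l := by
  induction l generalizing c with
  | nil => simp [cT]
  | cons x xs ih =>
    simp only [cT, List.foldl_cons]
    rw [ih, ih ((if x ≠ 0 then (0:Int) + 1 else 0))]
    split_ifs <;> ring

theorem cT_append (a b : List Int) : cT (a ++ b) = cT a + cT b := by
  simp only [cT, List.foldl_append]
  rw [cT_shift]
  rfl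

theorem cT_singleton (x : Int) : cT [x] = if x ≠ 0 then 1 else 0 := by
  simp [cT]

-- The loop invariant connecting A's state (cnt, bal, ones) to B's state (bal, boundary, i):
-- cnt counts truthy items before the boundary of the processed prefix, ones those after it.
theorem key : ∀ (l pref : List Int) (bal : Int) (boundary : Nat),
    0 ≤ bal → boundary ≤ pref.length → (bal = 0 → boundary = pref.length) →
    (l.foldl stepA (cT (pref.take boundary), bal, cT (pref.drop boundary))).1
      = cT ((pref ++ l).take (l.foldl stepB (bal, boundary, pref.length)).2.1) := by
  intro l
  induction l with
  | nil =>
    intro pref bal boundary _ hle _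
    simp
  | cons x xs ih =>
    intro pref bal boundary hnn hle hz
    have htake : (pref ++ [x]).take boundary = pref.take boundary :=
      List.take_append_of_le_length hle
    have hdrop : (pref ++ [x]).drop boundary = pref.drop boundary ++ [x] :=
      List.drop_append_of_le_length hle
    have hsplit : cT pref = cT (pref.take boundary) + cT (pref.drop boundary) := by
      conv_lhs => rw [← List.take_append_drop boundary pref, cT_append]
    rw [List.foldl_cons, List.foldl_cons]
    rcases eq_or_ne bal 0 with hb | hb
    · have hbd := hz hb; subst hb; subst hbd
      by_cases hx : x ≠ 0
      · -- balance 0, truthy item: counted immediately, boundary advances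
        have ha : stepA (cT (pref.take pref.length), 0, cT (pref.drop pref.length)) x
            = (cT (pref.take pref.length) + 1, 0, cT (pref.drop pref.length)) := by
          simp [stepA, hx]
        have hbb : stepB (0, pref.length, pref.length) x
            = (0, pref.length + 1, pref.length + 1) := by
          norm_num [stepB, hx]
        rw [ha, hbb]
        have hIH := ih (pref ++ [x]) 0 ((pref ++ [x]).length) le_rfl le_rfl (fun _ => rfl)
        rw [List.take_length, List.drop_length, cT_append, cT_singleton, if_pos hx] at hIH
        simp only [List.length_append, List.length_cons, List.length_nil, Nat.zero_add,
          List.append_assoc, List.singleton_append, List.take_length, List.drop_length] at hIH ⊢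
        exact hIH
      · -- balance 0, falsy item: balance becomes 1
        have hx0 : x = 0 := by omega
        have ha : stepA (cT (pref.take pref.length), 0, cT (pref.drop pref.length)) x
            = (cT (pref.take pref.length), 1, cT (pref.drop pref.length)) := by
          norm_num [stepA, hx0]
        have hbb : stepB (0, pref.length, pref.length) x
            = (1, pref.length, pref.length + 1) := by
          norm_num [stepB, hx0]
        rw [ha, hbb]
        have hIH := ih (pref ++ [x]) 1 pref.length (by norm_num) (by simp) (by norm_num)
        rw [List.take_append_of_le_length le_rfl,
            List.drop_append_of_le_length le_rfl] at hIH
        have hcx : cT (List.drop pref.length pref ++ [x]) = cT (List.drop pref.length pref) := by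
          rw [cT_append, cT_singleton]; simp [hx0]
        rw [hcx] at hIH
        simp only [List.length_append, List.length_cons, List.length_nil, Nat.zero_add,
          List.append_assoc, List.singleton_append] at hIH ⊢
        exact hIH
    · have hpos : 1 ≤ bal := by omega
      by_cases hx : x ≠ 0
      · rcases eq_or_ne bal 1 with h1 | h1
        · -- truthy item closes the segment: flush, boundary advances
          subst h1
          have ha : stepA (cT (pref.take boundary), 1, cT (pref.drop boundary)) x
              = (cT (pref.take boundary) + (cT (pref.drop boundary) + 1), 0, 0) := by
            norm_num [stepA, hx]
          have hbb : stepB (1, boundary, pref.length) x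
              = (0, pref.length + 1, pref.length + 1) := by
            norm_num [stepB, hx]
          rw [ha, hbb]
          have hIH := ih (pref ++ [x]) 0 ((pref ++ [x]).length) le_rfl le_rfl (fun _ => rfl)
          rw [List.take_length, List.drop_length, cT_append, cT_singleton, if_pos hx,
              hsplit] at hIH
          have hre : cT (pref.take boundary) + cT (pref.drop boundary) + 1
              = cT (pref.take boundary) + (cT (pref.drop boundary) + 1) := by ring
          rw [hre, show cT ([] : List Int) = 0 from rfl] at hIH
          simp only [List.length_append, List.length_cons, List.length_nil, Nat.zero_add,
            List.append_assoc, List.singleton_append] at hIH ⊢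
          exact hIH
        · -- truthy item, segment stays open: ones grows
          have hs : ¬(bal - 1 = 0) := by omega
          have hm : max (bal - 1) 0 = bal - 1 := by omega
          have ha : stepA (cT (pref.take boundary), bal, cT (pref.drop boundary)) x
              = (cT (pref.take boundary), bal - 1, cT (pref.drop boundary) + 1) := by
            simp [stepA, hb, hx, hs]
          have hbb : stepB (bal, boundary, pref.length) x
              = (bal - 1, boundary, pref.length + 1) := by
            simp [stepB, hx, hm, hs]
          rw [ha, hbb]
          have hIH := ih (pref ++ [x]) (bal - 1) boundary (by omega)
            (by simp; omega) (by omega)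
          rw [htake, hdrop, cT_append, cT_singleton, if_pos hx] at hIH
          simp only [List.length_append, List.length_cons, List.length_nil, Nat.zero_add,
            List.append_assoc, List.singleton_append] at hIH ⊢
          exact hIH
      · -- falsy item: balance grows
        have hx0 : x = 0 := by omega
        have hs : ¬(bal + 1 = 0) := by omega
        have ha : stepA (cT (pref.take boundary), bal, cT (pref.drop boundary)) x
            = (cT (pref.take boundary), bal + 1, cT (pref.drop boundary)) := by
          simp [stepA, hb, hx0, hs]
        have hbb : stepB (bal, boundary, pref.length) x
            = (bal + 1, boundary, pref.length + 1) := by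
          simp [stepB, hx0, hs]
        rw [ha, hbb]
        have hIH := ih (pref ++ [x]) (bal + 1) boundary (by omega) (by simp; omega) (by omega)
        rw [htake, hdrop, cT_append, cT_singleton] at hIH
        rw [show (if x ≠ 0 then (1:Int) else 0) = 0 from by simp [hx0], add_zero] at hIH
        simp only [List.length_append, List.length_cons, List.length_nil, Nat.zero_add,
          List.append_assoc, List.singleton_append] at hIH ⊢
        exact hIH

-- ===== VERDICT (by name: the statement is the Claim_ definition above) =====
theorem check_spec : Claim_equal_check := by
  intro seq _
  show check seq = check_alt seq
  have h := key seq [] 0 0 le_rfl (by simp) (by simp)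
  simpa [check, check_alt, cT] using h
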